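-- pv_equiv track=rewrite | github.com/HenryDaiCode/PEulermusings | Problem 145.py | reversible
-- ===== SOURCE A (Python) =====
-- def reversible(n):
--     #No leading zeroes allowed in reverse(n)
--     if n <= 0 or n % 10 == 0:
--         return False
--     digitlist = []
--     #Extract digits into a list
--     while (n > 0):
--         digitlist.append(n % 10)
--         n = n // 10
--     length = len(digitlist)
--     sum = 0
--     i = 0
--     extra = 0
--     while i < length:
--         digitsum = digitlist[i] + digitlist[length - 1 - i] + extra
--         if digitsum % 2 == 0:
--             return False
--         else:
--             extra = digitsum // 10
--             sum += (digitsum % 10) * (10 ** i)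
--         i += 1
--     if extra == 0:
--         return True
--     elif extra % 2 == 1:
--         return True
--     else:
--         return False
-- ===== SOURCE B (Python) =====
-- def reversible(n):
--     # No leading zeroes allowed in reverse(n)
--     if n <= 0 or n % 10 == 0:
--         return False
--     r, m = 0, n
--     while m > 0:
--         r = r * 10 + m % 10
--         m //= 10
--     t = n + r
--     while t > 0:
--         if t % 2 == 0:
--             return False
--         t //= 10
--     return True
-- ===== Notes on version B (the rewrite author's own statement) =====
-- stated objective: simpler
-- what changed: B drops A's digit-list and manual ripple-carry addition loop: it builds the reversed number arithmetically, adds it with built-in integer addition, and then checks each decimal digit of the sum for oddness.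
import Mathlib
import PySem

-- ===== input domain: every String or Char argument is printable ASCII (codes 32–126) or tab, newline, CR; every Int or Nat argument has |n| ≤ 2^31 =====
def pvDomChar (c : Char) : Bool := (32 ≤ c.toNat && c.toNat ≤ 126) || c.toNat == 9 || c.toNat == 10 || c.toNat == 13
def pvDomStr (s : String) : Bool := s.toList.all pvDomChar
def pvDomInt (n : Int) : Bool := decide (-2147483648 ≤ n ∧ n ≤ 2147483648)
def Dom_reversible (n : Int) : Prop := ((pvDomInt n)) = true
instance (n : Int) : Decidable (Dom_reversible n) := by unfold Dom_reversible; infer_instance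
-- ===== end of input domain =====

-- B replaces A's digit-list plus manual ripple-carry loop by building the reversed
-- number arithmetically, using built-in addition, and checking the sum's digits (objective: simpler).

-- ===== PORT A =====
-- while (n > 0): digitlist.append(n % 10); n = n // 10   (little-endian digit list)
def pvDigitsA (n : Int) : List Int :=
  if _h : 0 < n then
    PySem.Int.mod n 10 :: pvDigitsA (PySem.Int.floordiv n 10)
  else []
termination_by n.toNat
decreasing_by
  have : PySem.Int.floordiv n 10 = n / 10 := PySem.Int.floordiv_eq_ediv_of_pos (by omega)
  rw [this]; omega

-- while i < length: … (digitlist indexing is in range, so getD is exact)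
def pvLoopA (dl : List Int) (L i : Nat) (sum extra : Int) : Bool :=
  if _h : i < L then
    let digitsum := dl.getD i 0 + dl.getD (L - 1 - i) 0 + extra
    if PySem.Int.mod digitsum 2 == 0 then false
    else pvLoopA dl L (i + 1) (sum + PySem.Int.mod digitsum 10 * 10 ^ i)
           (PySem.Int.floordiv digitsum 10)
  else if extra == 0 then true
  else if PySem.Int.mod extra 2 == 1 then true
  else false
termination_by L - i

def reversible (n : Int) : Bool :=
  if n ≤ 0 || PySem.Int.mod n 10 == 0 then false
  else
    let dl := pvDigitsA n
    pvLoopA dl dl.length 0 0 0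

-- ===== PORT B =====
-- while m > 0: r = r * 10 + m % 10; m //= 10
def pvRevB (m r : Int) : Int :=
  if _h : 0 < m then
    pvRevB (PySem.Int.floordiv m 10) (r * 10 + PySem.Int.mod m 10)
  else r
termination_by m.toNat
decreasing_by
  have : PySem.Int.floordiv m 10 = m / 10 := PySem.Int.floordiv_eq_ediv_of_pos (by omega)
  rw [this]; omega

-- while t > 0: if t % 2 == 0: return False; t //= 10
def pvOddB (t : Int) : Bool :=
  if _h : 0 < t then
    if PySem.Int.mod t 2 == 0 then false
    else pvOddB (PySem.Int.floordiv t 10)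
  else true
termination_by t.toNat
decreasing_by
  have : PySem.Int.floordiv t 10 = t / 10 := PySem.Int.floordiv_eq_ediv_of_pos (by omega)
  rw [this]; omega

def reversible_alt (n : Int) : Bool :=
  if n ≤ 0 || PySem.Int.mod n 10 == 0 then false
  else pvOddB (n + pvRevB n 0)

-- ===== PRECONDITION & SPEC =====
def Spec_reversible (n : Int) (out : Bool) : Prop := out = reversible_alt n
instance (n : Int) (out : Bool) : Decidable (Spec_reversible n out) := by unfold Spec_reversible; infer_instance

-- ===== CLAIM (what is proved, stated in full; the proofs are below) =====
def Claim_equal_reversible : Prop := ∀ (n : Int), Dom_reversible n → Spec_reversible n (reversible n)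

-- ===== LEMMAS AND PROOFS =====

-- value of a little-endian digit list
def pvVal : List Int → Int
  | [] => 0
  | e :: t => e + 10 * pvVal t

-- A's index loop rewritten structurally on the list of pairwise digit sums
def pvLoopE : List Int → Int → Bool
  | [], x => if x == 0 then true else if PySem.Int.mod x 2 == 1 then true else false
  | e :: t, x =>
    if PySem.Int.mod (e + x) 2 == 0 then false
    else pvLoopE t (PySem.Int.floordiv (e + x) 10)

theorem pvMod_pos (a b : Int) (hb : 0 < b) : PySem.Int.mod a b = a % b :=
  PySem.Int.mod_eq_emod_of_pos hb

theorem pvDiv_pos (a b : Int) (hb : 0 < b) : PySem.Int.floordiv a b = a / b :=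
  PySem.Int.floordiv_eq_ediv_of_pos hb

theorem pvDigitsA_pos (n : Int) (h : 0 < n) :
    pvDigitsA n = PySem.Int.mod n 10 :: pvDigitsA (PySem.Int.floordiv n 10) := by
  rw [pvDigitsA]; simp [h]

theorem pvDigitsA_nonpos (n : Int) (h : ¬ 0 < n) : pvDigitsA n = [] := by
  rw [pvDigitsA]; simp [h]

theorem pvDigitsA_mem (n : Int) : ∀ e ∈ pvDigitsA n, 0 ≤ e ∧ e ≤ 9 := by
  by_cases h : 0 < n
  · rw [pvDigitsA_pos n h]
    intro e he
    rcases List.mem_cons.1 he with rfl | he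
    · rw [pvMod_pos _ _ (by omega)]
      constructor
      · exact Int.emod_nonneg n (by omega)
      · have := Int.emod_lt_of_pos n (b := 10) (by omega); omega
    · exact pvDigitsA_mem (PySem.Int.floordiv n 10) e he
  · rw [pvDigitsA_nonpos n h]; intro e he; cases he
termination_by n.toNat
decreasing_by
  rw [pvDiv_pos _ _ (by omega)]; omega

-- reconstruction: the digit list's value is n
theorem pvVal_digits (n : Int) (h : 0 ≤ n) : pvVal (pvDigitsA n) = n := by
  by_cases hp : 0 < n
  · rw [pvDigitsA_pos n hp, pvVal,
      pvVal_digits (PySem.Int.floordiv n 10) (by rw [pvDiv_pos _ _ (by omega)]; omega),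
      pvMod_pos _ _ (by omega), pvDiv_pos _ _ (by omega)]
    omega
  · rw [pvDigitsA_nonpos n hp, pvVal]; omega
termination_by n.toNat
decreasing_by
  rw [pvDiv_pos _ _ (by omega)]; omega

theorem pvVal_append_singleton (l : List Int) (d : Int) :
    pvVal (l ++ [d]) = pvVal l + d * 10 ^ l.length := by
  induction l with
  | nil => simp [pvVal]
  | cons e t ih => simp [pvVal, ih]; ring

-- B's reverse loop builds the value of the reversed digit list
theorem pvRevB_eq (m r : Int) :
    pvRevB m r = pvVal (pvDigitsA m).reverse + r * 10 ^ (pvDigitsA m).length := by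
  by_cases h : 0 < m
  · rw [pvRevB]; simp only [h, dite_true]
    rw [pvRevB_eq (PySem.Int.floordiv m 10) (r * 10 + PySem.Int.mod m 10),
      pvDigitsA_pos m h]
    simp only [List.reverse_cons, List.length_cons, pvVal_append_singleton,
      List.length_reverse]
    ring
  · rw [pvRevB]; simp only [h, dite_false]
    rw [pvDigitsA_nonpos m h]; simp [pvVal]
termination_by m.toNat
decreasing_by
  rw [pvDiv_pos _ _ (by omega)]; omega

theorem pvVal_zipWith (a b : List Int) (h : a.length = b.length) :
    pvVal (List.zipWith (· + ·) a b) = pvVal a + pvVal b := by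
  induction a generalizing b with
  | nil => cases b <;> simp_all [pvVal]
  | cons e t ih =>
    cases b with
    | nil => simp at h
    | cons f u =>
      simp only [List.zipWith_cons_cons, pvVal]
      rw [ih u (by simpa using h)]; ring

-- bridge: A's index loop equals the structural loop over the pairwise-sum list
theorem pvLoopA_eq_loopE (dl : List Int) (i : Nat) (sum extra : Int)
    (hi : i ≤ dl.length) :
    pvLoopA dl dl.length i sum extra =
      pvLoopE ((List.zipWith (· + ·) dl dl.reverse).drop i) extra := by
  rw [pvLoopA]
  by_cases h : i < dl.length
  · simp only [h, dite_true]
    have hlen : (List.zipWith (· + ·) dl dl.reverse).length = dl.length := by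
      simp
    have hdrop : (List.zipWith (· + ·) dl dl.reverse).drop i =
        (List.zipWith (· + ·) dl dl.reverse)[i] ::
          (List.zipWith (· + ·) dl dl.reverse).drop (i + 1) := by
      exact List.drop_eq_getElem_cons (by omega)
    have hget : (List.zipWith (· + ·) dl dl.reverse)[i]'(by omega) =
        dl[i]'h + dl.reverse[i]'(by simpa using h) := by
      simp
    have hrev : dl.reverse[i]'(by simpa using h) = dl[dl.length - 1 - i]'(by omega) := by
      rw [List.getElem_reverse]
    have hgd1 : dl.getD i 0 = dl[i]'h := List.getD_eq_getElem dl 0 h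
    have hgd2 : dl.getD (dl.length - 1 - i) 0 = dl[dl.length - 1 - i]'(by omega) :=
      List.getD_eq_getElem dl 0 (by omega)
    rw [hdrop, pvLoopE]
    rw [hget, hrev, hgd1, hgd2]
    split_ifs with hpar
    · rfl
    · exact pvLoopA_eq_loopE dl (i + 1) _ _ (by omega)
  · simp only [h, dite_false]
    have : (List.zipWith (· + ·) dl dl.reverse).drop i = [] := by
      apply List.drop_eq_nil_of_le; simp; omega
    rw [this, pvLoopE]
termination_by dl.length - i

theorem pvVal_pos (es : List Int) (hnn : ∀ e ∈ es, 0 ≤ e)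
    (hlast : 0 < es.getD (es.length - 1) 0) : 0 < pvVal es := by
  induction es with
  | nil => simp at hlast
  | cons e t ih =>
    cases t with
    | nil => simpa [pvVal] using hlast
    | cons f u =>
      have h0 : 0 ≤ e := hnn e (by simp)
      have ht : 0 < pvVal (f :: u) := by
        apply ih
        · intro x hx; exact hnn x (List.mem_cons_of_mem _ hx)
        · simpa using hlast
      simp only [pvVal] at ht ⊢
      omega

theorem pvVal_nonneg (es : List Int) (h : ∀ e ∈ es, 0 ≤ e) : 0 ≤ pvVal es := by
  induction es with
  | nil => simp [pvVal]
  | cons e t ih =>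
    have h0 := h e (by simp)
    have ht := ih (fun f hf => h f (List.mem_cons_of_mem _ hf))
    simp only [pvVal]; omega

theorem pvOddB_zero : pvOddB 0 = true := by rw [pvOddB]; simp

theorem pvOddB_one : pvOddB 1 = true := by
  rw [pvOddB]
  have h1 : PySem.Int.mod 1 2 = 1 := by decide
  have h2 : PySem.Int.floordiv 1 10 = 0 := by decide
  simp [pvOddB_zero]

-- main loop lemma: the carry loop decides "all decimal digits of x + value are odd"
theorem pvLoopE_eq_odd (es : List Int) (x : Int)
    (hb : ∀ e ∈ es, 0 ≤ e ∧ e ≤ 18) (hx0 : 0 ≤ x) (hx1 : x ≤ 1)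
    (hlast : es = [] ∨ 0 < es.getD (es.length - 1) 0) :
    pvLoopE es x = pvOddB (x + pvVal es) := by
  induction es generalizing x with
  | nil =>
    have hv : pvVal ([] : List Int) = 0 := rfl
    rw [hv]
    interval_cases x
    · rw [show (0:Int) + 0 = 0 by ring, pvOddB_zero]
      decide
    · rw [show (1:Int) + 0 = 1 by ring, pvOddB_one]
      decide
  | cons e t ih =>
    have hlast' : 0 < (e :: t).getD ((e :: t).length - 1) 0 := by
      rcases hlast with h | h
      · cases h
      · exact h
    have he : 0 ≤ e ∧ e ≤ 18 := hb e (by simp)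
    have htnn : ∀ f ∈ t, 0 ≤ f := fun f hf => (hb f (List.mem_cons_of_mem _ hf)).1
    have hVt : 0 ≤ pvVal t := pvVal_nonneg t htnn
    have hVpos : 0 < e + x + 10 * pvVal t := by
      cases t with
      | nil =>
        simp only [List.getD, List.length_cons, List.length_nil] at hlast'
        simp [pvVal] at hlast' ⊢
        omega
      | cons f u =>
        have : 0 < pvVal (f :: u) := by
          apply pvVal_pos _ htnn
          simpa using hlast'
        omega
    simp only [pvVal, pvLoopE]
    rw [pvOddB]
    have hpos : 0 < x + (e + 10 * pvVal t) := by omega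
    simp only [hpos, dite_true]
    have hmodeq : PySem.Int.mod (x + (e + 10 * pvVal t)) 2 = PySem.Int.mod (e + x) 2 := by
      rw [pvMod_pos _ _ (by omega), pvMod_pos _ _ (by omega)]
      omega
    rw [hmodeq]
    split_ifs with hpar
    · rfl
    · have hdiv : PySem.Int.floordiv (x + (e + 10 * pvVal t)) 10 =
          PySem.Int.floordiv (e + x) 10 + pvVal t := by
        rw [pvDiv_pos _ _ (by omega), pvDiv_pos _ _ (by omega)]
        omega
      have hx' : 0 ≤ PySem.Int.floordiv (e + x) 10 ∧ PySem.Int.floordiv (e + x) 10 ≤ 1 := by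
        rw [pvDiv_pos _ _ (by omega)]
        omega
      have hlt : t = [] ∨ 0 < t.getD (t.length - 1) 0 := by
        cases t with
        | nil => left; rfl
        | cons f u => right; simpa using hlast'
      rw [hdiv, ← ih _ (fun f hf => hb f (List.mem_cons_of_mem _ hf)) hx'.1 hx'.2 hlt]

theorem pvMem_zipWith {a b : List Int} {e : Int}
    (h : e ∈ List.zipWith (· + ·) a b) : ∃ x ∈ a, ∃ y ∈ b, e = x + y := by
  induction a generalizing b with
  | nil => simp at h
  | cons p q ih =>
    cases b with
    | nil => simp at h
    | cons r u =>
      rcases List.mem_cons.1 h with rfl | h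
      · exact ⟨p, by simp, r, by simp, rfl⟩
      · rcases ih h with ⟨x, hx, y, hy, rfl⟩
        exact ⟨x, List.mem_cons_of_mem _ hx, y, List.mem_cons_of_mem _ hy, rfl⟩

-- leading digit of a positive n is positive
theorem pvDigitsA_last_pos (n : Int) (h : 0 < n) :
    0 < (pvDigitsA n).getD ((pvDigitsA n).length - 1) 0 := by
  rw [pvDigitsA_pos n h]
  by_cases h10 : 0 < PySem.Int.floordiv n 10
  · have ih := pvDigitsA_last_pos (PySem.Int.floordiv n 10) h10
    have hne : pvDigitsA (PySem.Int.floordiv n 10) ≠ [] := by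
      rw [pvDigitsA_pos _ h10]; simp
    cases hd : pvDigitsA (PySem.Int.floordiv n 10) with
    | nil => exact absurd hd hne
    | cons f u => rw [hd] at ih; simpa using ih
  · have hlt : n < 10 := by
      rw [pvDiv_pos _ _ (by omega)] at h10; omega
    rw [pvDigitsA_nonpos _ h10]
    have hmn : (0:Int) < PySem.Int.mod n 10 := by
      rw [pvMod_pos _ _ (by omega)]; omega
    simpa [List.getD] using hmn
termination_by n.toNat
decreasing_by
  rw [pvDiv_pos _ _ (by omega)]; omega

-- ===== VERDICT (by name: the statement is the Claim_ definition above) =====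
theorem reversible_spec : Claim_equal_reversible := by
  intro n _
  show reversible n = reversible_alt n
  unfold reversible reversible_alt
  by_cases hn : n ≤ 0
  · simp [hn]
  · by_cases hm : (10:Int) ∣ n
    · simp [hn, PySem.Int.mod_eq_zero_iff_dvd, hm]
    · have hg : (decide (n ≤ 0) || (PySem.Int.mod n 10 == 0)) = false := by
        simp [hn, PySem.Int.mod_eq_zero_iff_dvd, hm]
      simp only [hg, Bool.false_eq_true, if_false]
      have hpos : 0 < n := by omega
      set dl := pvDigitsA n with hdl
      rw [pvLoopA_eq_loopE dl 0 0 0 (Nat.zero_le _), List.drop_zero]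
      have hlen : dl.length = dl.reverse.length := by simp
      have hzip : pvVal (List.zipWith (· + ·) dl dl.reverse)
          = pvVal dl + pvVal dl.reverse := pvVal_zipWith _ _ hlen
      have hvd : pvVal dl = n := pvVal_digits n (by omega)
      have hrev : pvRevB n 0 = pvVal dl.reverse := by
        rw [pvRevB_eq]; simp [hdl]
      have hmem : ∀ e ∈ List.zipWith (· + ·) dl dl.reverse, 0 ≤ e ∧ e ≤ 18 := by
        intro e he
        rcases pvMem_zipWith he with ⟨x, hx, y, hy, rfl⟩
        have h1 := pvDigitsA_mem n x hx
        have h2 := pvDigitsA_mem n y (List.mem_reverse.1 hy)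
        omega
      have hne : dl ≠ [] := by
        rw [hdl, pvDigitsA_pos n hpos]; simp
      have hL : 0 < dl.length := List.length_pos_iff.2 hne
      have hzl : (List.zipWith (· + ·) dl dl.reverse).length = dl.length := by simp
      have hlast : List.zipWith (· + ·) dl dl.reverse = [] ∨
          0 < (List.zipWith (· + ·) dl dl.reverse).getD
            ((List.zipWith (· + ·) dl dl.reverse).length - 1) 0 := by
        right
        have hdlast := pvDigitsA_last_pos n hpos
        rw [List.getD_eq_getElem _ 0 (by omega), List.getElem_zipWith]
        have hg1 : 0 ≤ dl.reverse[(List.zipWith (· + ·) dl dl.reverse).length - 1]'(by simp; omega) := by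
          have hm1 : dl.reverse[(List.zipWith (· + ·) dl dl.reverse).length - 1]'(by simp; omega) ∈ dl.reverse :=
            List.getElem_mem _
          have := pvDigitsA_mem n _ (List.mem_reverse.1 hm1)
          omega
        have hg2 : 0 < dl[(List.zipWith (· + ·) dl dl.reverse).length - 1]'(by omega) := by
          rw [← List.getD_eq_getElem dl 0, hzl]
          exact hdlast
        omega
      rw [pvLoopE_eq_odd _ 0 hmem (by omega) (by omega) hlast, hzip, hvd, hrev, zero_add]
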